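-- pv_equiv track=rewrite | github.com/pypi-data/pypi-mirror-399 | packages/janus-quantum/janus_quantum-1.0.1.tar.gz/janus_quantum-1.0.1/janus/encode/schmidt_encode.py | partition_by_bit
-- ===== SOURCE A (Python) =====
-- from typing import List, Dict, Tuple
--
-- def partition_by_bit(bases: List[str], bit_pos: int, excluded: List[int]):
--     """按指定比特位分割基态集合"""
--     available_bits = [i for i in range(len(bases[0])) if i not in excluded]
--
--     best_pos = bit_pos
--     best_split = ([], [])
--     max_imbalance = -1
--
--     for pos in available_bits:
--         zeros = [b for b in bases if b[pos] == '0']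
--         ones = [b for b in bases if b[pos] == '1']
--
--         if zeros and ones:
--             imbalance = abs(len(zeros) - len(ones))
--             if imbalance > max_imbalance:
--                 max_imbalance = imbalance
--                 best_pos = pos
--                 best_split = (zeros, ones)
--
--     return best_pos, best_split[0], best_split[1]
-- ===== SOURCE B (Python) =====
-- def partition_by_bit(bases, bit_pos, excluded):
--     """Transpose the bases into columns with zip(*bases), score each usable column
--     by |#'0' - #'1'|, pick the winner with max(), partition the rows once."""
--     scores = [(abs(col.count('0') - col.count('1')), pos)
--               for pos, col in enumerate(zip(*bases))
--               if pos not in excluded and '0' in col and '1' in col]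
--     if not scores:
--         return bit_pos, [], []
--     best = max(scores, key=lambda t: t[0])[1]
--     zeros, ones = [], []
--     for b in bases:
--         if b[best] == '0':
--             zeros.append(b)
--         elif b[best] == '1':
--             ones.append(b)
--     return best, zeros, ones
-- ===== Notes on version B (the rewrite author's own statement) =====
-- stated objective: alternative
-- what changed: A scans each candidate position and materialises the zeros/ones split lists there to track the best; B instead transposes the bases into columns with zip(*bases), scores each usable column from its character counts, selects the winner declaratively with max(key=...), and partitions the rows in a single append pass at the end.
import Mathlib
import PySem

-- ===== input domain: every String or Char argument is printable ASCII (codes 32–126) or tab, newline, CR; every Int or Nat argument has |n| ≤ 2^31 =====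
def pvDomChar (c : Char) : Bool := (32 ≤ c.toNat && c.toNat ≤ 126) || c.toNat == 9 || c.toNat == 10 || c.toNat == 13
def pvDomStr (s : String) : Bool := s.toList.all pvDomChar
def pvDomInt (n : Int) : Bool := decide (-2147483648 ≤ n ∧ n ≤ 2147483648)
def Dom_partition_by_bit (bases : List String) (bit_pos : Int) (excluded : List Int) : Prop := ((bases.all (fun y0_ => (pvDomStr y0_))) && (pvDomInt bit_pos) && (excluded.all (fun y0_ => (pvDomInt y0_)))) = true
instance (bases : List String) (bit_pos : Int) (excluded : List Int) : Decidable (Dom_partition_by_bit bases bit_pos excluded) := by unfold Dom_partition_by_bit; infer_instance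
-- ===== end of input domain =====

-- B transposes the bases into columns (zip(*bases)), scores each usable column once,
-- picks the winner with max(key=…) and partitions the rows in a single pass
-- (objective: alternative decomposition, same asymptotic cost).

-- ===== PORT A =====
-- literal port of A: for each available position build zeros/ones lists and keep the best split
def partition_by_bit (bases : List String) (bit_pos : Int) (excluded : List Int) : Int × List String × List String :=
  let availableBits := (List.range (bases.headD "").toList.length).filter
      (fun i => ¬ (Int.ofNat i) ∈ excluded)
  let st := availableBits.foldl
    (fun (st : Int × Int × List String × List String) pos =>
      let zeros := bases.filter (fun b => PySem.Str.pyGet? b (Int.ofNat pos) == some '0')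
      let ones := bases.filter (fun b => PySem.Str.pyGet? b (Int.ofNat pos) == some '1')
      if zeros ≠ [] ∧ ones ≠ [] then
        let imbalance : Int := |(zeros.length : Int) - (ones.length : Int)|
        if imbalance > st.1 then (imbalance, (Int.ofNat pos), zeros, ones) else st
      else st)
    (-1, bit_pos, [], [])
  (st.2.1, st.2.2.1, st.2.2.2)

-- ===== PORT B =====
-- hand port of Python's zip(*rows), exact for a nonempty rows list:
-- one tuple per index below the shortest row's length
def pvZipStar (rows : List (List Char)) : List (List Char) :=
  match rows with
  | [] => []
  | r :: rs =>
      let m := rs.foldl (fun acc t => min acc t.length) r.length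
      (List.range m).map (fun p => (r :: rs).map (fun row => row.getD p ' '))

-- literal port of B: score the enumerated columns, pick the first max, partition once
def partition_by_bit_alt (bases : List String) (bit_pos : Int) (excluded : List Int) : Int × List String × List String :=
  let cols := pvZipStar (bases.map String.toList)
  let scores : List (Int × Int) :=
    ((PySem.List.enumerate cols).filter (fun pc =>
        decide (¬ pc.1 ∈ excluded) && pc.2.contains '0' && pc.2.contains '1')).map
      (fun pc => (|((pc.2.count '0' : Int)) - ((pc.2.count '1' : Int))|, pc.1))
  if scores = [] then (bit_pos, [], [])
  else
    match PySem.List.max? scores (fun t => t.1) with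
    | none => (bit_pos, [], [])
    | some t =>
      let zo := bases.foldl (fun (zo : List String × List String) b =>
          if PySem.Str.pyGet? b t.2 == some '0' then (zo.1 ++ [b], zo.2)
          else if PySem.Str.pyGet? b t.2 == some '1' then (zo.1, zo.2 ++ [b])
          else zo) ([], [])
      (t.2, zo.1, zo.2)

-- ===== PRECONDITION & SPEC =====
-- Pre_ excludes exactly the inputs where A raises IndexError: empty bases (bases[0]) and
-- inputs where some non-excluded position < len(bases[0]) is out of range for some base string.
def Pre_partition_by_bit (bases : List String) (bit_pos : Int) (excluded : List Int) : Prop :=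
  bases ≠ [] ∧ ∀ i < (bases.headD "").toList.length, ¬ (Int.ofNat i) ∈ excluded →
    ∀ b ∈ bases, i < b.toList.length
instance (bases : List String) (bit_pos : Int) (excluded : List Int) : Decidable (Pre_partition_by_bit bases bit_pos excluded) := by unfold Pre_partition_by_bit; infer_instance

def pvWitness_partition_by_bit : List String × Int × List Int := (["010", "110", "001"], 0, [1])

def Spec_partition_by_bit (bases : List String) (bit_pos : Int) (excluded : List Int) (out : Int × List String × List String) : Prop := out = partition_by_bit_alt bases bit_pos excluded
instance (bases : List String) (bit_pos : Int) (excluded : List Int) (out : Int × List String × List String) : Decidable (Spec_partition_by_bit bases bit_pos excluded out) := by unfold Spec_partition_by_bit; infer_instance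

-- ===== CLAIM (what is proved, stated in full; the proofs are below) =====
def Claim_equal_partition_by_bit : Prop := ∀ (bases : List String) (bit_pos : Int) (excluded : List Int), Dom_partition_by_bit bases bit_pos excluded → Pre_partition_by_bit bases bit_pos excluded → Spec_partition_by_bit bases bit_pos excluded (partition_by_bit bases bit_pos excluded)

-- ===== LEMMAS AND PROOFS =====

-- the zeros/ones split at a position, the imbalance, and the (imbalance, position)
-- candidate produced by a position (none if excluded or one side is empty)
def pbbZ (bases : List String) (i : Int) : List String :=
  bases.filter (fun b => PySem.Str.pyGet? b i == some '0')
def pbbO (bases : List String) (i : Int) : List String :=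
  bases.filter (fun b => PySem.Str.pyGet? b i == some '1')
def pbbImb (bases : List String) (i : Int) : Int :=
  |((pbbZ bases i).length : Int) - ((pbbO bases i).length : Int)|
def pbbG (bases : List String) (excluded : List Int) (p : Nat) : Option (Int × Int) :=
  if ¬ (Int.ofNat p) ∈ excluded ∧ pbbZ bases (Int.ofNat p) ≠ [] ∧ pbbO bases (Int.ofNat p) ≠ [] then
    some (pbbImb bases (Int.ofNat p), Int.ofNat p)
  else none
-- the running first-max step (the body of PySem.List.max? keyed by the first component)
def pbbStepM (o : Option (Int × Int)) (t : Int × Int) : Option (Int × Int) :=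
  match o with
  | none => some t
  | some m => if m.1 < t.1 then some t else some m

theorem pbb_max?_eq (xs : List (Int × Int)) :
    PySem.List.max? xs (fun t => t.1) = xs.foldl pbbStepM none := by
  unfold PySem.List.max?
  congr 1
  funext o t
  cases o <;> rfl

-- invariant tying A's running state to the running first-max over the candidates
def pbbInv (bases : List String) (bit_pos : Int)
    (a : Int × Int × List String × List String) (o : Option (Int × Int)) : Prop :=
  (o = none → a = (-1, bit_pos, [], [])) ∧
  (∀ t : Int × Int, o = some t → a = (t.1, t.2, pbbZ bases t.2, pbbO bases t.2))

theorem pbb_step (bases : List String) (bit_pos : Int) (excluded : List Int) (pos : Nat)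
    (hm : ¬ (Int.ofNat pos) ∈ excluded)
    (a : Int × Int × List String × List String) (o : Option (Int × Int))
    (h : pbbInv bases bit_pos a o) :
    pbbInv bases bit_pos
      (let zeros := bases.filter (fun b => PySem.Str.pyGet? b (Int.ofNat pos) == some '0')
       let ones := bases.filter (fun b => PySem.Str.pyGet? b (Int.ofNat pos) == some '1')
       if zeros ≠ [] ∧ ones ≠ [] then
         let imbalance : Int := |(zeros.length : Int) - (ones.length : Int)|
         if imbalance > a.1 then (imbalance, (Int.ofNat pos), zeros, ones) else a
       else a)
      ((match pbbG bases excluded pos with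
        | some t => [t] | none => []).foldl pbbStepM o) := by
  obtain ⟨hn, hs⟩ := h
  by_cases hg : pbbZ bases (Int.ofNat pos) ≠ [] ∧ pbbO bases (Int.ofNat pos) ≠ []
  · have hG : pbbG bases excluded pos = some (pbbImb bases (Int.ofNat pos), Int.ofNat pos) := by
      unfold pbbG; rw [if_pos ⟨hm, hg⟩]
    rw [hG]
    show pbbInv bases bit_pos
      (if pbbZ bases (Int.ofNat pos) ≠ [] ∧ pbbO bases (Int.ofNat pos) ≠ []
       then (if pbbImb bases (Int.ofNat pos) > a.1
             then (pbbImb bases (Int.ofNat pos), Int.ofNat pos,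
                   pbbZ bases (Int.ofNat pos), pbbO bases (Int.ofNat pos))
             else a)
       else a)
      (pbbStepM o (pbbImb bases (Int.ofNat pos), Int.ofNat pos))
    rw [if_pos hg]
    cases o with
    | none =>
      have ha := hn rfl
      have hgt : pbbImb bases (Int.ofNat pos) > a.1 := by
        rw [ha]
        show pbbImb bases (Int.ofNat pos) > -1
        have := abs_nonneg (((pbbZ bases (Int.ofNat pos)).length : Int) -
          ((pbbO bases (Int.ofNat pos)).length : Int))
        simp only [pbbImb]
        omega
      rw [if_pos hgt]
      show pbbInv bases bit_pos _ (some (pbbImb bases (Int.ofNat pos), Int.ofNat pos))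
      exact ⟨(fun hx => nomatch hx), (fun t ht => by cases ht; rfl)⟩
    | some m =>
      have ha := hs m rfl
      show pbbInv bases bit_pos _
        (if m.1 < pbbImb bases (Int.ofNat pos)
         then some (pbbImb bases (Int.ofNat pos), Int.ofNat pos) else some m)
      by_cases hlt : m.1 < pbbImb bases (Int.ofNat pos)
      · rw [if_pos hlt, if_pos (show pbbImb bases (Int.ofNat pos) > a.1 by rw [ha]; exact hlt)]
        exact ⟨(fun hx => nomatch hx), (fun t ht => by cases ht; rfl)⟩
      · rw [if_neg hlt, if_neg (show ¬ pbbImb bases (Int.ofNat pos) > a.1 by rw [ha]; exact hlt)]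
        exact ⟨(fun hx => nomatch hx), (fun t ht => by cases ht; exact ha)⟩
  · have hG : pbbG bases excluded pos = none := by
      unfold pbbG; rw [if_neg (by tauto)]
    rw [hG]
    show pbbInv bases bit_pos
      (if pbbZ bases (Int.ofNat pos) ≠ [] ∧ pbbO bases (Int.ofNat pos) ≠ []
       then (if pbbImb bases (Int.ofNat pos) > a.1
             then (pbbImb bases (Int.ofNat pos), Int.ofNat pos,
                   pbbZ bases (Int.ofNat pos), pbbO bases (Int.ofNat pos))
             else a)
       else a)
      (List.foldl pbbStepM o [])
    rw [if_neg hg]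
    exact ⟨hn, hs⟩

theorem pbb_foldA (bases : List String) (bit_pos : Int) (excluded : List Int) :
    ∀ (L : List Nat) (a : Int × Int × List String × List String) (o : Option (Int × Int)),
    pbbInv bases bit_pos a o →
    pbbInv bases bit_pos
      ((L.filter (fun i => ¬ (Int.ofNat i) ∈ excluded)).foldl
        (fun (st : Int × Int × List String × List String) pos =>
          let zeros := bases.filter (fun b => PySem.Str.pyGet? b (Int.ofNat pos) == some '0')
          let ones := bases.filter (fun b => PySem.Str.pyGet? b (Int.ofNat pos) == some '1')
          if zeros ≠ [] ∧ ones ≠ [] then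
            let imbalance : Int := |(zeros.length : Int) - (ones.length : Int)|
            if imbalance > st.1 then (imbalance, (Int.ofNat pos), zeros, ones) else st
          else st) a)
      ((L.filterMap (pbbG bases excluded)).foldl pbbStepM o)
  | [], a, o, h => h
  | p :: L, a, o, h => by
    by_cases hm : (Int.ofNat p) ∈ excluded
    · have hG : pbbG bases excluded p = none := by
        unfold pbbG; rw [if_neg (by tauto)]
      rw [List.filter_cons, if_neg (by simpa using hm), List.filterMap_cons, hG]
      exact pbb_foldA bases bit_pos excluded L a o h
    · have hstep := pbb_step bases bit_pos excluded p hm a o h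
      rw [List.filter_cons, if_pos (by simpa using hm), List.foldl_cons, List.filterMap_cons]
      cases hG : pbbG bases excluded p with
      | none =>
        rw [hG] at hstep
        simp only [List.foldl_nil] at hstep
        exact pbb_foldA bases bit_pos excluded L _ o hstep
      | some t =>
        rw [hG] at hstep
        simp only [List.foldl_cons, List.foldl_nil] at hstep
        rw [List.foldl_cons]
        exact pbb_foldA bases bit_pos excluded L _ _ hstep

theorem pbb_pairfold (P Q : String → Bool) :
    ∀ (l : List String) (z o : List String),
    l.foldl (fun (zo : List String × List String) b =>
        if P b then (zo.1 ++ [b], zo.2)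
        else if Q b then (zo.1, zo.2 ++ [b])
        else zo) (z, o)
    = (z ++ l.filter P, o ++ l.filter (fun b => !P b && Q b))
  | [], z, o => by simp
  | b :: l, z, o => by
    simp only [List.foldl_cons, List.filter_cons]
    by_cases hP : P b
    · simp only [hP, if_pos, Bool.not_true, Bool.false_and]
      rw [pbb_pairfold P Q l (z ++ [b]) o]
      simp
    · by_cases hQ : Q b
      · simp only [hP, hQ, Bool.not_false, Bool.true_and, if_pos, Bool.false_eq_true,
          if_false]
        rw [pbb_pairfold P Q l z (o ++ [b])]
        simp
      · simp only [hP, hQ, Bool.false_eq_true, if_false]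
        rw [pbb_pairfold P Q l z o]
        simp

-- foldl-min facts about Python's zip truncation length
theorem pbb_min_le_init : ∀ (l : List (List Char)) (a : Nat),
    l.foldl (fun acc t => min acc t.length) a ≤ a
  | [], a => le_refl a
  | r :: l, a => le_trans (pbb_min_le_init l (min a r.length)) (min_le_left _ _)

theorem pbb_min_le_mem : ∀ (l : List (List Char)) (a : Nat) (r : List Char), r ∈ l →
    l.foldl (fun acc t => min acc t.length) a ≤ r.length
  | r' :: l, a, r, h => by
    rcases List.mem_cons.1 h with h1 | h1
    · subst h1
      exact le_trans (pbb_min_le_init l (min a r.length)) (min_le_right _ _)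
    · exact pbb_min_le_mem l (min a r'.length) r h1

theorem pbb_lt_min : ∀ (l : List (List Char)) (a p : Nat), p < a → (∀ r ∈ l, p < r.length) →
    p < l.foldl (fun acc t => min acc t.length) a
  | [], a, p, h, _ => h
  | r :: l, a, p, h, hl => by
    exact pbb_lt_min l (min a r.length) p (lt_min h (hl r List.mem_cons_self))
      (fun r' hr' => hl r' (List.mem_cons_of_mem _ hr'))

theorem pbb_enum_map_range {α : Type} (m : Nat) (f : Nat → α) :
    PySem.List.enumerate ((List.range m).map f) 0 = (List.range m).map (fun p => (Int.ofNat p, f p)) := by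
  apply List.ext_getElem
  · simp [PySem.List.length_enumerate]
  · intro k h1 h2
    rw [PySem.List.getElem_enumerate]
    simp [List.getElem_range]

theorem pbb_filter_map_eq_filterMap {α β : Type} (q : α → Bool) (f : α → β) :
    ∀ (l : List α), (l.filter q).map f = l.filterMap (fun p => if q p then some (f p) else none)
  | [] => rfl
  | x :: l => by
    rw [List.filter_cons, List.filterMap_cons]
    by_cases hq : q x
    · rw [if_pos hq, if_pos hq, List.map_cons, pbb_filter_map_eq_filterMap q f l]
    · rw [if_neg hq, if_neg hq, pbb_filter_map_eq_filterMap q f l]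

-- B's score list is exactly the A-side candidate list, under Pre_
theorem pbb_scores_eq (bases : List String) (excluded : List Int)
    (hne : bases ≠ [])
    (hpre : ∀ i < (bases.headD "").toList.length, ¬ (Int.ofNat i) ∈ excluded →
      ∀ b ∈ bases, i < b.toList.length) :
    ((PySem.List.enumerate (pvZipStar (bases.map String.toList))).filter (fun pc =>
        decide (¬ pc.1 ∈ excluded) && pc.2.contains '0' && pc.2.contains '1')).map
      (fun pc => (|((pc.2.count '0' : Int)) - ((pc.2.count '1' : Int))|, pc.1))
    = (List.range (bases.headD "").toList.length).filterMap (pbbG bases excluded) := by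
  obtain ⟨hd, tl, rfl⟩ : ∃ hd tl, bases = hd :: tl := by
    cases bases with
    | nil => exact absurd rfl hne
    | cons hd tl => exact ⟨hd, tl, rfl⟩
  set bases := hd :: tl with hbases
  set n := (bases.headD "").toList.length with hn
  set m := (tl.map String.toList).foldl (fun acc t => min acc t.length) hd.toList.length with hm
  have hrows : bases.map String.toList = hd.toList :: tl.map String.toList := by
    simp [hbases]
  have hcols : pvZipStar (bases.map String.toList) =
      (List.range m).map (fun p => (bases.map String.toList).map (fun row => row.getD p ' ')) := by
    rw [hrows]; rfl
  have hmle : ∀ b ∈ bases, m ≤ b.toList.length := by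
    intro b hb
    rcases List.mem_cons.1 hb with h1 | h1
    · subst h1; exact pbb_min_le_init _ _
    · exact pbb_min_le_mem _ _ _ (List.mem_map_of_mem h1)
  have hmn : m ≤ n := by
    have := pbb_min_le_init (tl.map String.toList) hd.toList.length
    simpa [hn, hbases] using this
  have hlt : ∀ p < n, ¬ (Int.ofNat p) ∈ excluded → p < m := by
    intro p hp hx
    exact pbb_lt_min _ _ _ (by simpa [hn, hbases] using hpre p hp hx hd List.mem_cons_self)
      (fun r hr => by
        rcases List.mem_map.1 hr with ⟨b, hb, rfl⟩
        exact hpre p hp hx b (List.mem_cons_of_mem _ hb))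
  rw [hcols, pbb_enum_map_range, List.filter_map, List.map_map,
    pbb_filter_map_eq_filterMap]
  have hsplit : (List.range n).filterMap (pbbG bases excluded)
      = (List.range m).filterMap (pbbG bases excluded) := by
    conv_lhs => rw [show n = m + (n - m) by omega, List.range_add]
    rw [List.filterMap_append]
    have : ((List.range (n - m)).map (fun x => m + x)).filterMap (pbbG bases excluded) = [] := by
      rw [List.filterMap_eq_nil_iff]
      intro p hp
      rcases List.mem_map.1 hp with ⟨x, hx, rfl⟩
      unfold pbbG
      rw [if_neg]
      rintro ⟨hexc, -, -⟩
      have := hlt (m + x) (by have := List.mem_range.1 hx; omega) hexc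
      omega
    rw [this, List.append_nil]
  rw [hsplit]
  apply List.filterMap_congr
  intro p hp
  have hpm : p < m := List.mem_range.1 hp
  have hall : ∀ b ∈ bases, p < b.toList.length := fun b hb => lt_of_lt_of_le hpm (hmle b hb)
  simp only [Function.comp_def]
  rw [List.map_map]
  simp only [Function.comp_def]
  by_cases hexc : (Int.ofNat p) ∈ excluded
  · have hexc' : ((p : ℕ) : ℤ) ∈ excluded := hexc
    simp [pbbG, hexc']
  · have hchar : ∀ b ∈ bases, ∀ c : Char,
        ((b.toList.getD p ' ') == c) = (PySem.Str.pyGet? b (Int.ofNat p) == some c) := by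
      intro b hb c
      have hlen := hall b hb
      rw [PySem.Str.pyGet?]
      show _ = (PySem.List.pyGet? b.toList (Int.ofNat p) == some c)
      rw [Int.ofNat_eq_natCast, PySem.List.pyGet?_natCast, List.getElem?_eq_getElem hlen,
        List.getD_eq_getElem _ _ hlen]
      simp
    have hcontains : ∀ c : Char,
        ((bases.map (fun b => b.toList.getD p ' ')).contains c)
          = decide ((bases.filter (fun b => PySem.Str.pyGet? b (Int.ofNat p) == some c)) ≠ []) := by
      intro c
      by_cases hex : ∃ b ∈ bases, PySem.Str.pyGet? b (Int.ofNat p) == some c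
      · rcases hex with ⟨b, hb, hbc⟩
        have h1 : (((bases.map fun b => b.toList.getD p ' ')).contains c) = true := by
          rw [List.contains_iff_exists_mem_beq]
          refine ⟨b.toList.getD p ' ', List.mem_map_of_mem hb, ?_⟩
          rw [BEq.comm, hchar b hb c]; exact hbc
        rw [h1, eq_comm, decide_eq_true_iff]
        intro hnil
        rw [List.filter_eq_nil_iff] at hnil
        exact hnil b hb hbc
      · have h1 : (((bases.map fun b => b.toList.getD p ' ')).contains c) = false := by
          rw [← Bool.not_eq_true, List.contains_iff_exists_mem_beq]
          rintro ⟨x, hx, hcx⟩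
          rcases List.mem_map.1 hx with ⟨b, hb, rfl⟩
          exact hex ⟨b, hb, by rw [← hchar b hb c, BEq.comm]; exact hcx⟩
        rw [h1, eq_comm, decide_eq_false_iff_not]
        intro hnil
        apply hnil
        rw [List.filter_eq_nil_iff]
        intro b hb hbc
        exact hex ⟨b, hb, hbc⟩
    have hcount : ∀ c : Char,
        ((bases.map (fun b => b.toList.getD p ' ')).count c)
          = (bases.filter (fun b => PySem.Str.pyGet? b (Int.ofNat p) == some c)).length := by
      intro c
      rw [List.count_eq_countP, List.countP_map, ← List.countP_eq_length_filter]
      apply List.countP_congr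
      intro b hb
      simp only [Function.comp_def]
      rw [hchar b hb c]
    rw [pbbG]
    by_cases hzo : pbbZ bases (Int.ofNat p) ≠ [] ∧ pbbO bases (Int.ofNat p) ≠ []
    · have hcondR : ¬ (Int.ofNat p) ∈ excluded ∧ pbbZ bases (Int.ofNat p) ≠ [] ∧
          pbbO bases (Int.ofNat p) ≠ [] := ⟨hexc, hzo⟩
      rw [if_pos hcondR, if_pos]
      · unfold pbbImb pbbZ pbbO
        rw [hcount '0', hcount '1']
      · simp only [Bool.and_eq_true, decide_eq_true_iff]
        refine ⟨⟨by simpa using hexc, ?_⟩, ?_⟩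
        · rw [hcontains '0']; exact decide_eq_true hzo.1
        · rw [hcontains '1']; exact decide_eq_true hzo.2
    · have hcondR : ¬ (¬ (Int.ofNat p) ∈ excluded ∧ pbbZ bases (Int.ofNat p) ≠ [] ∧
          pbbO bases (Int.ofNat p) ≠ []) := by tauto
      rw [if_neg hcondR, if_neg]
      simp only [Bool.and_eq_true, decide_eq_true_iff, not_and]
      rintro ⟨-, h0⟩ h1
      apply hzo
      constructor
      · rw [hcontains '0'] at h0; exact of_decide_eq_true h0
      · rw [hcontains '1'] at h1; exact of_decide_eq_true h1

-- A's value, written through the candidate list and the first-max fold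
theorem pbb_A_eq (bases : List String) (bit_pos : Int) (excluded : List Int) :
    partition_by_bit bases bit_pos excluded =
      match ((List.range (bases.headD "").toList.length).filterMap (pbbG bases excluded)).foldl
          pbbStepM none with
      | none => (bit_pos, [], [])
      | some t => (t.2, pbbZ bases t.2, pbbO bases t.2) := by
  have h := pbb_foldA bases bit_pos excluded (List.range (bases.headD "").toList.length)
    (-1, bit_pos, [], []) none ⟨(fun _ => rfl), (fun t ht => nomatch ht)⟩
  cases hfin : ((List.range (bases.headD "").toList.length).filterMap (pbbG bases excluded)).foldl
      pbbStepM none with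
  | none =>
    rw [hfin] at h
    show (_, _, _) = _
    rw [h.1 rfl]
  | some t =>
    rw [hfin] at h
    show (_, _, _) = _
    rw [h.2 t rfl]

-- the else-if branch of B's partition pass agrees with the plain '1'-filter
theorem pbb_elif_filter (bases : List String) (i : Int) :
    bases.filter (fun b => !(PySem.Str.pyGet? b i == some '0') &&
      (PySem.Str.pyGet? b i == some '1')) = pbbO bases i := by
  unfold pbbO
  apply List.filter_congr
  intro b _
  cases hx : PySem.Str.pyGet? b i with
  | none => simp
  | some c =>
    by_cases hc : c = '1'
    · subst hc; simp
    · simp [hc]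

-- B's value, written through the same candidate list and first-max fold, under Pre_
theorem pbb_B_eq (bases : List String) (bit_pos : Int) (excluded : List Int)
    (hne : bases ≠ [])
    (hpre : ∀ i < (bases.headD "").toList.length, ¬ (Int.ofNat i) ∈ excluded →
      ∀ b ∈ bases, i < b.toList.length) :
    partition_by_bit_alt bases bit_pos excluded =
      match ((List.range (bases.headD "").toList.length).filterMap (pbbG bases excluded)).foldl
          pbbStepM none with
      | none => (bit_pos, [], [])
      | some t => (t.2, pbbZ bases t.2, pbbO bases t.2) := by
  simp only [partition_by_bit_alt]
  rw [pbb_scores_eq bases excluded hne hpre, pbb_max?_eq]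
  cases hfin : ((List.range (bases.headD "").toList.length).filterMap (pbbG bases excluded)).foldl
      pbbStepM none with
  | none =>
    have hnil : (List.range (bases.headD "").toList.length).filterMap (pbbG bases excluded) = [] := by
      rw [← PySem.List.max?_eq_none_iff _ (fun t : Int × Int => t.1), pbb_max?_eq]
      exact hfin
    rw [if_pos hnil]
  | some t =>
    have hnil : (List.range (bases.headD "").toList.length).filterMap (pbbG bases excluded) ≠ [] := by
      intro hx
      rw [hx] at hfin
      exact nomatch hfin
    rw [if_neg hnil]
    show (t.2, _, _) = (t.2, pbbZ bases t.2, pbbO bases t.2)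
    rw [pbb_pairfold (fun b => PySem.Str.pyGet? b t.2 == some '0')
      (fun b => PySem.Str.pyGet? b t.2 == some '1') bases [] []]
    rw [List.nil_append, List.nil_append, pbb_elif_filter]
    rfl

-- ===== VERDICT (by name: the statement is the Claim_ definition above) =====
theorem partition_by_bit_spec : Claim_equal_partition_by_bit := by
  intro bases bit_pos excluded _ hpre
  unfold Spec_partition_by_bit
  obtain ⟨hne, hrange⟩ := hpre
  rw [pbb_A_eq bases bit_pos excluded, pbb_B_eq bases bit_pos excluded hne hrange]
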